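-- pv_equiv track=rewrite | github.com/tensorflow/tensorflow | tensorflow/python/autograph/tests/loop_with_function_call_test.py | while_with_lambda_closure_call
-- ===== SOURCE A (Python) =====
-- def while_with_lambda_closure_call(n):
--   i = 0
--   s = 0
--   i_via_closure = lambda: i + 2
--   while i < n:
--     s = s * 10 + i_via_closure()
--     i += 1
--   return s
-- ===== SOURCE B (Python) =====
-- def while_with_lambda_closure_call(n):
--   # Closed form: s = sum_{j=0}^{n-1} (n+1-j)*10^j = (n+1)*repunit(n) - sum_j j*10^j,
--   # both summands have exact closed forms, so no loop is needed.
--   if n <= 0: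
--     return 0
--   p = 10 ** n
--   rep = (p - 1) // 9
--   sumjp = (10 * ((n - 1) * p - n * (p // 10) + 1)) // 81
--   return (n + 1) * rep - sumjp
-- ===== Notes on version B (the rewrite author's own statement) =====
-- stated objective: faster
-- what changed: Replaces A's n-iteration Horner while-loop (s = s*10 + closure()) by a loop-free closed form (n+1)*repunit(n) - sum_j j*10^j computed with one power and two exact integer divisions.
import Mathlib
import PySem

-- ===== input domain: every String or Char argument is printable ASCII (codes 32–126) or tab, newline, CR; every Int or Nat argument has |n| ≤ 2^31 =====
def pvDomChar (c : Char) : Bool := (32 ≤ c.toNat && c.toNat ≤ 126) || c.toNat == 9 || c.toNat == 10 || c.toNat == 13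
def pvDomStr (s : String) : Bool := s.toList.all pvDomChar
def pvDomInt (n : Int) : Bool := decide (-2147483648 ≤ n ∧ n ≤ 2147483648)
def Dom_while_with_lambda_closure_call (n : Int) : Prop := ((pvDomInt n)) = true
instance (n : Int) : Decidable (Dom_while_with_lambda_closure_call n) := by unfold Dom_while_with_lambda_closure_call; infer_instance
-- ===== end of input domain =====

-- B replaces A's n-step Horner while-loop by a loop-free closed form
-- (n+1)*repunit(n) - Σ j*10^j computed with exact integer divisions (objective: faster).

-- ===== PORT A =====
-- literal port of A's while loop: i counts up from 0, s = s*10 + i_via_closure() (= i + 2)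
def pvLoopA (n i s : Int) : Int :=
  if i < n then pvLoopA n (i + 1) (s * 10 + (i + 2)) else s
termination_by (n - i).toNat
decreasing_by omega

def while_with_lambda_closure_call (n : Int) : Int :=
  pvLoopA n 0 0

-- ===== PORT B =====
-- literal port of Source B's closed form
def while_with_lambda_closure_call_alt (n : Int) : Int :=
  if n ≤ 0 then 0
  else
    let p : Int := 10 ^ n.toNat
    let rep := PySem.Int.floordiv (p - 1) 9
    let sumjp := PySem.Int.floordiv (10 * ((n - 1) * p - n * (PySem.Int.floordiv p 10) + 1)) 81
    (n + 1) * rep - sumjp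

-- ===== PRECONDITION & SPEC =====
def Spec_while_with_lambda_closure_call (n : Int) (out : Int) : Prop := out = while_with_lambda_closure_call_alt n
instance (n : Int) (out : Int) : Decidable (Spec_while_with_lambda_closure_call n out) := by unfold Spec_while_with_lambda_closure_call; infer_instance

-- ===== CLAIM (what is proved, stated in full; the proofs are below) =====
def Claim_equal_while_with_lambda_closure_call : Prop := ∀ (n : Int), Dom_while_with_lambda_closure_call n → Spec_while_with_lambda_closure_call n (while_with_lambda_closure_call n)

-- ===== LEMMAS AND PROOFS =====

-- pvDigits i k : the value A's loop accumulates in k further iterations starting at counter i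
def pvDigits (i : Int) (k : Nat) : Int :=
  match k with
  | 0 => 0
  | k + 1 => (i + 2) * 10 ^ k + pvDigits (i + 1) k

theorem pvDigits_succ (i : Int) (k : Nat) :
    pvDigits i (k + 1) = 10 * pvDigits i k + (i + (k : Int) + 2) := by
  induction k generalizing i with
  | zero => simp [pvDigits]
  | succ k ih =>
    rw [show k + 1 + 1 = (k + 1) + 1 from rfl, pvDigits, ih (i + 1), pvDigits]
    push_cast
    ring

theorem pvLoopA_eq (k : Nat) (n i s : Int) (hk : (n - i).toNat = k) :
    pvLoopA n i s = s * 10 ^ k + pvDigits i k := by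
  induction k generalizing i s with
  | zero =>
    rw [pvLoopA]
    have : ¬ i < n := by omega
    simp [this, pvDigits]
  | succ k ih =>
    rw [pvLoopA]
    have h : i < n := by omega
    rw [if_pos h, ih (i + 1) _ (by omega), pow_succ, pvDigits]
    ring

-- the repunit Σ_{j<k} 10^j : 9 * pvRep k = 10^k - 1
def pvRep (k : Nat) : Int :=
  match k with
  | 0 => 0
  | k + 1 => 10 * pvRep k + 1

theorem pvRep_eq (k : Nat) : 9 * pvRep k = 10 ^ k - 1 := by
  induction k with
  | zero => simp [pvRep]
  | succ k ih => rw [pvRep, pow_succ]; linarith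

-- pvS k = Σ_{j<k} j*10^j : 81 * pvS k = (k-1)*10^(k+1) - k*10^k + 10
def pvS (k : Nat) : Int :=
  match k with
  | 0 => 0
  | k + 1 => pvS k + (k : Int) * 10 ^ k

theorem pvS_eq (k : Nat) :
    81 * pvS k = ((k : Int) - 1) * 10 ^ (k + 1) - (k : Int) * 10 ^ k + 10 := by
  induction k with
  | zero => simp [pvS]
  | succ k ih =>
    rw [pvS]
    push_cast
    linear_combination ih

theorem pvDigits81 (k : Nat) :
    81 * pvDigits 0 k =
      9 * ((k : Int) + 1) * (10 ^ k - 1) - (((k : Int) - 1) * 10 ^ (k + 1) - (k : Int) * 10 ^ k + 10) := by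
  induction k with
  | zero => simp [pvDigits]
  | succ k ih =>
    rw [pvDigits_succ]
    push_cast
    linear_combination 10 * ih

-- the closed form: pvDigits 0 k = (k+1)*pvRep k - pvS k
theorem pvDigits_closed (k : Nat) :
    pvDigits 0 k = ((k : Int) + 1) * pvRep k - pvS k := by
  have h81 : (81 : Int) * pvDigits 0 k = 81 * (((k : Int) + 1) * pvRep k - pvS k) := by
    linear_combination pvDigits81 k - 9 * ((k : Int) + 1) * pvRep_eq k + pvS_eq k
  exact mul_left_cancel₀ (by norm_num : (81 : Int) ≠ 0) h81

theorem fdiv_exact (q b : Int) (hb : b ≠ 0) : PySem.Int.floordiv (b * q) b = q := by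
  simp [PySem.Int.floordiv, Int.mul_fdiv_cancel_left _ hb]

-- ===== VERDICT (by name: the statement is the Claim_ definition above) =====
theorem while_with_lambda_closure_call_spec : Claim_equal_while_with_lambda_closure_call := by
  intro n _
  unfold Spec_while_with_lambda_closure_call while_with_lambda_closure_call while_with_lambda_closure_call_alt
  by_cases hn : n ≤ 0
  · rw [if_pos hn, pvLoopA_eq 0 n 0 0 (by omega)]
    simp [pvDigits]
  · rw [if_neg hn, pvLoopA_eq n.toNat n 0 0 (by omega)]
    show (0 : Int) * 10 ^ n.toNat + pvDigits 0 n.toNat =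
      (n + 1) * PySem.Int.floordiv ((10 : Int) ^ n.toNat - 1) 9 -
        PySem.Int.floordiv
          (10 * ((n - 1) * (10 : Int) ^ n.toNat - n * PySem.Int.floordiv ((10 : Int) ^ n.toNat) 10 + 1)) 81
    have hk : ((n.toNat : Int)) = n := by omega
    obtain ⟨m, hm⟩ : ∃ m, n.toNat = m + 1 := ⟨n.toNat - 1, by omega⟩
    have hrep : (10 : Int) ^ n.toNat - 1 = 9 * pvRep n.toNat := by
      rw [pvRep_eq]
    have hp10 : PySem.Int.floordiv ((10 : Int) ^ n.toNat) 10 = 10 ^ m := by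
      rw [hm, pow_succ, mul_comm]
      exact fdiv_exact _ _ (by norm_num)
    rw [hrep, fdiv_exact _ _ (by norm_num), hp10]
    have hnum : 10 * ((n - 1) * (10 : Int) ^ n.toNat - n * 10 ^ m + 1) = 81 * pvS n.toNat := by
      rw [pvS_eq, hm]
      push_cast
      have : ((m : Int)) = n - 1 := by omega
      rw [this]
      ring
    rw [hnum, fdiv_exact _ _ (by norm_num)]
    have hD := pvDigits_closed n.toNat
    rw [hk] at hD
    simp only [zero_mul, zero_add, hD]
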